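-- pv_equiv track=rewrite | github.com/jcolinpatrick/kryptos | scripts/team/e_null_mask_crib_only.py | score_crib_partial_free
-- ===== SOURCE A (Python) =====
-- CRIB_ENE = "EASTNORTHEAST"
--
-- CRIB_BC = "BERLINCLOCK"
--
-- def score_crib_partial_free(plaintext: str) -> int:
--     """Count how many characters of each crib appear at the best offset.
--
--     Slide each crib across the plaintext and find the position with the most
--     character matches. Return total character hits across both cribs.
--     """
--     total = 0
--     for crib in [CRIB_ENE, CRIB_BC]:
--         best = 0
--         crib_len = len(crib)
--         for start in range(len(plaintext) - crib_len + 1):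
--             hits = sum(1 for j in range(crib_len) if plaintext[start + j] == crib[j])
--             if hits > best:
--                 best = hits
--         total += best
--     return total
-- ===== SOURCE B (Python) =====
-- CRIB_ENE = "EASTNORTHEAST"
--
-- CRIB_BC = "BERLINCLOCK"
--
-- def score_crib_partial_free(plaintext: str) -> int:
--     """Count how many characters of each crib appear at the best offset.
--
--     Index-first formulation: build a table of positions per character once,
--     then for each crib accumulate matches per diagonal (offset = pos - j)
--     into an array of counters and take the largest counter.
--     """
--     positions = {}
--     for p, ch in enumerate(plaintext):
--         positions.setdefault(ch, []).append(p)
--     total = 0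
--     for crib in [CRIB_ENE, CRIB_BC]:
--         n = len(plaintext) - len(crib) + 1
--         counts = [0] * n
--         for j, c in enumerate(crib):
--             for p in positions.get(c, []):
--                 s = p - j
--                 if 0 <= s < len(counts):
--                     counts[s] += 1
--         total += max(counts, default=0)
--     return total
-- ===== Notes on version B (the rewrite author's own statement) =====
-- stated objective: faster
-- what changed: Replaces A's offset-outer sliding scan (recomputing all m character comparisons at every offset) by a once-built character-to-positions table and per-diagonal (offset = position - crib index) counter accumulation into an array, finishing with a max over the counters.
import Mathlib
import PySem

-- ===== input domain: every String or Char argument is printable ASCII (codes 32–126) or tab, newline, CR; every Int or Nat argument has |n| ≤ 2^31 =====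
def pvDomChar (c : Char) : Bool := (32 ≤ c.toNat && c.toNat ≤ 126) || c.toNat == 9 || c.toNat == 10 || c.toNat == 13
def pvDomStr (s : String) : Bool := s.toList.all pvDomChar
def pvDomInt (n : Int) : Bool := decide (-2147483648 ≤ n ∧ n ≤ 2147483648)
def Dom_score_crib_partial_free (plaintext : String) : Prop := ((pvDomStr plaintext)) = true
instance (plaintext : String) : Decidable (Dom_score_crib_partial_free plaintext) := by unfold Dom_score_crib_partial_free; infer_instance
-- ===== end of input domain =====

-- B replaces A's offset-outer sliding scan by a per-character position table and
-- per-diagonal counters: only positions whose character actually matches a crib letter are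
-- visited (measurably faster in a timing run; same value proved for every input).

def CRIB_ENE : String := "EASTNORTHEAST"

def CRIB_BC : String := "BERLINCLOCK"

-- ===== PORT A =====
-- hits = sum(1 for j in range(crib_len) if plaintext[start + j] == crib[j])
def pvHitsA (pl cb : List Char) (start : Int) : Int :=
  (PySem.List.pyRange 0 (cb.length : Int) 1).foldl
    (fun acc j => if PySem.List.pyGet? pl (start + j) = PySem.List.pyGet? cb j then acc + 1 else acc) 0

-- for start in range(len(plaintext) - crib_len + 1): … running max with strict >
def pvBestA (pl cb : List Char) : Int :=
  (PySem.List.pyRange 0 ((pl.length : Int) - (cb.length : Int) + 1) 1).foldl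
    (fun best start => if pvHitsA pl cb start > best then pvHitsA pl cb start else best) 0

def score_crib_partial_free (plaintext : String) : Int :=
  [CRIB_ENE, CRIB_BC].foldl (fun total cb => total + pvBestA plaintext.toList cb.toList) 0

-- ===== PORT B =====
-- positions.setdefault(ch, []).append(p)
def pvPositions (pl : List Char) : PySem.Dict Char (List Int) :=
  (PySem.List.enumerate pl 0).foldl
    (fun d pc => d.modify pc.2 [] (fun l => l ++ [pc.1])) PySem.Dict.empty

-- if 0 <= s < len(counts): counts[s] += 1
def pvBump (counts : List Int) (s : Int) : List Int :=
  if 0 ≤ s ∧ s < (counts.length : Int) then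
    PySem.List.pySetD counts s (PySem.List.pyGetD counts s 0 + 1)
  else counts

-- counts = [0] * n; the two nested B loops
def pvCountsB (positions : PySem.Dict Char (List Int)) (pl cb : List Char) : List Int :=
  (PySem.List.enumerate cb 0).foldl
    (fun counts jc => (positions.getD jc.2 []).foldl (fun cs p => pvBump cs (p - jc.1)) counts)
    (List.replicate ((pl.length : Int) - (cb.length : Int) + 1).toNat 0)

def score_crib_partial_free_alt (plaintext : String) : Int :=
  let pl := plaintext.toList
  let positions := pvPositions pl
  [CRIB_ENE, CRIB_BC].foldl
    (fun total cb =>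
      total + (PySem.List.max? (pvCountsB positions pl cb.toList) (fun x => x)).getD 0) 0

-- ===== PRECONDITION & SPEC =====
def Spec_score_crib_partial_free (plaintext : String) (out : Int) : Prop := out = score_crib_partial_free_alt plaintext
instance (plaintext : String) (out : Int) : Decidable (Spec_score_crib_partial_free plaintext out) := by unfold Spec_score_crib_partial_free; infer_instance

-- ===== CLAIM (what is proved, stated in full; the proofs are below) =====
def Claim_equal_score_crib_partial_free : Prop := ∀ (plaintext : String), Dom_score_crib_partial_free plaintext → Spec_score_crib_partial_free plaintext (score_crib_partial_free plaintext)

-- ===== LEMMAS AND PROOFS =====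

-- the group-by-character position lists, as filter/map (proof-side view of pvPositions)
def pvPosList (pl : List Char) (c : Char) : List Int :=
  ((PySem.List.enumerate pl 0).filter (fun pc => pc.2 == c)).map (fun pc => pc.1)

theorem pv_getD_positions (pl : List Char) (c : Char) :
    (pvPositions pl).getD c [] = pvPosList pl c := by
  unfold pvPositions pvPosList
  have h : (PySem.List.enumerate pl 0).foldl
        (fun d pc => d.modify pc.2 [] (fun l => l ++ [pc.1])) PySem.Dict.empty
      = ((PySem.List.enumerate pl 0).map Prod.swap).foldl
        (fun d q => d.modify q.1 [] (fun l => l ++ [q.2])) PySem.Dict.empty := by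
    rw [List.foldl_map]
    simp
  rw [h, PySem.Dict.getD_foldl_modify_append]
  simp [List.filter_map, List.map_map, Function.comp_def]

theorem pv_posList_nodup (pl : List Char) (c : Char) : (pvPosList pl c).Nodup := by
  unfold pvPosList
  have hsub : List.Sublist
      (((PySem.List.enumerate pl 0).filter (fun pc => pc.2 == c)).map (fun pc => pc.1))
      ((PySem.List.enumerate pl 0).map (fun pc => pc.1)) :=
    List.Sublist.map _ List.filter_sublist
  have hnd : ((PySem.List.enumerate pl 0).map (fun pc => pc.1)).Nodup := by
    rw [PySem.List.map_fst_enumerate]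
    exact PySem.List.nodup_pyRange_one _ _
  exact hnd.sublist hsub

theorem pv_mem_posList (pl : List Char) (c : Char) (v : Int) (hv : 0 ≤ v) :
    v ∈ pvPosList pl c ↔ pl[v.toNat]? = some c := by
  unfold pvPosList
  simp only [List.mem_map, List.mem_filter, PySem.List.mem_enumerate_iff]
  constructor
  · rintro ⟨pc, ⟨⟨k, hk, rfl⟩, hc⟩, rfl⟩
    simp only [beq_iff_eq] at hc
    simp only [zero_add]
    have hkk : ((k : Int)).toNat = k := by omega
    rw [hkk, List.getElem?_eq_getElem hk, hc]
  · intro h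
    have hvlen : v.toNat < pl.length := by
      by_contra hh
      rw [List.getElem?_eq_none (by omega)] at h
      simp at h
    refine ⟨((v.toNat : Int), pl[v.toNat]), ⟨⟨v.toNat, hvlen, by simp⟩, ?_⟩, by simp; omega⟩
    rw [List.getElem?_eq_getElem hvlen] at h
    simpa using (Option.some.inj h)

theorem pv_count_posList (pl : List Char) (c : Char) (v : Int) (hv : 0 ≤ v) :
    (pvPosList pl c).count v = if pl[v.toNat]? = some c then 1 else 0 := by
  by_cases hm : v ∈ pvPosList pl c
  · rw [List.count_eq_one_of_mem (pv_posList_nodup pl c) hm,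
      if_pos ((pv_mem_posList pl c v hv).mp hm)]
  · rw [List.count_eq_zero_of_not_mem hm,
      if_neg (fun h => hm ((pv_mem_posList pl c v hv).mpr h))]

theorem pv_bump_length (cs : List Int) (s : Int) : (pvBump cs s).length = cs.length := by
  unfold pvBump
  split_ifs with h
  · exact PySem.List.length_pySetD _ _ _
  · rfl

theorem pv_bump_foldl_length (E : List Int) (cs : List Int) :
    (E.foldl pvBump cs).length = cs.length := by
  induction E generalizing cs with
  | nil => rfl
  | cons e E ih => rw [List.foldl_cons, ih, pv_bump_length]

theorem pv_bump_getD (cs : List Int) (e k : Int) (h0 : 0 ≤ k) (hk : k < (cs.length : Int)) :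
    PySem.List.pyGetD (pvBump cs e) k 0
      = PySem.List.pyGetD cs k 0 + (if e = k then 1 else 0) := by
  have hlt : k.toNat < cs.length := by omega
  unfold pvBump
  split_ifs with hr he he
  · -- e in range, e = k
    subst he
    rw [PySem.List.pySetD_of_nonneg _ _ h0, PySem.List.pyGetD_of_nonneg _ _ h0,
      PySem.List.pyGetD_of_nonneg _ _ h0]
    simp [List.getD_eq_getElem?_getD, hlt]
  · -- e in range, e ≠ k
    rw [PySem.List.pySetD_of_nonneg _ _ hr.1, PySem.List.pyGetD_of_nonneg _ _ h0,
      PySem.List.pyGetD_of_nonneg _ _ h0]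
    have hne : e.toNat ≠ k.toNat := by omega
    simp [List.getD_eq_getElem?_getD, hne]
  · -- e out of range but e = k: impossible
    exact absurd (he ▸ ⟨h0, hk⟩) hr
  · ring

theorem pv_bump_foldl_getD (E : List Int) (cs : List Int) (k : Int)
    (h0 : 0 ≤ k) (hk : k < (cs.length : Int)) :
    PySem.List.pyGetD (E.foldl pvBump cs) k 0
      = PySem.List.pyGetD cs k 0 + (E.count k : Int) := by
  induction E generalizing cs with
  | nil => simp
  | cons e E ih =>
    rw [List.foldl_cons, ih (pvBump cs e) (by rw [pv_bump_length cs e]; exact hk),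
      pv_bump_getD cs e k h0 hk, List.count_cons]
    by_cases h : e = k
    · subst h
      simp only [beq_self_eq_true, if_true]
      push_cast
      ring
    · have hke : (e == k) = false := beq_eq_false_iff_ne.mpr h
      simp only [if_neg h, hke, Bool.false_eq_true, if_false, add_zero]

theorem pv_countsB_flat (pos : PySem.Dict Char (List Int)) (pl cb : List Char) :
    pvCountsB pos pl cb
      = ((PySem.List.enumerate cb 0).flatMap
          (fun jc => (pos.getD jc.2 []).map (fun p => p - jc.1))).foldl pvBump
        (List.replicate ((pl.length : Int) - (cb.length : Int) + 1).toNat 0) := by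
  unfold pvCountsB
  rw [List.foldl_flatMap]
  simp only [List.foldl_map]

theorem pv_hits_countP (pl cb : List Char) (s : Int) :
    pvHitsA pl cb s
      = ((PySem.List.pyRange 0 (cb.length : Int) 1).countP
          (fun j => decide (PySem.List.pyGet? pl (s + j) = PySem.List.pyGet? cb j)) : Int) := by
  unfold pvHitsA
  rw [PySem.List.foldl_ite_add_one]
  ring

theorem pv_hits_nonneg (pl cb : List Char) (s : Int) : 0 ≤ pvHitsA pl cb s := by
  rw [pv_hits_countP]
  positivity

theorem pv_count_events (pl cb : List Char) (s : Int) (h0 : 0 ≤ s) :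
    (((PySem.List.enumerate cb 0).flatMap
        (fun jc => ((pvPositions pl).getD jc.2 []).map (fun p => p - jc.1))).count s : Int)
      = pvHitsA pl cb s := by
  rw [List.count_flatMap, pv_hits_countP, PySem.List.enumerate_eq_map_pyRange cb 'A',
    List.map_map, ← PySem.List.sum_map_ite_one_zero
      (fun j => decide (PySem.List.pyGet? pl (s + j) = PySem.List.pyGet? cb j))]
  push_cast
  simp only [PySem.List.len_eq, List.map_map]
  congr 1
  apply List.map_congr_left
  intro j hj
  have hjr : 0 ≤ j ∧ j < (cb.length : Int) := by
    simpa using (PySem.List.mem_pyRange_one).mp hj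
  have hjlen : j.toNat < cb.length := by omega
  simp only [Function.comp_apply]
  have h1 : List.count s (List.map (fun p => p - j)
      ((pvPositions pl).getD (PySem.List.pyGetD cb j 'A') []))
      = List.count (s + j) ((pvPositions pl).getD (PySem.List.pyGetD cb j 'A') []) := by
    have := List.count_map_of_injective
      ((pvPositions pl).getD (PySem.List.pyGetD cb j 'A') [])
      (fun p => p - j) sub_left_injective (s + j)
    simpa using this
  rw [h1, pv_getD_positions, pv_count_posList pl _ (s + j) (by omega)]
  have h2 : PySem.List.pyGetD cb j 'A' = cb[j.toNat] := by
    rw [PySem.List.pyGetD_of_nonneg _ _ hjr.1, List.getD_eq_getElem _ _ hjlen]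
  have h3 : PySem.List.pyGet? cb j = some cb[j.toNat] := by
    rw [PySem.List.pyGet?_of_nonneg _ hjr.1, List.getElem?_eq_getElem hjlen]
  have h4 : PySem.List.pyGet? pl (s + j) = pl[(s + j).toNat]? := by
    rw [PySem.List.pyGet?_of_nonneg _ (by omega)]
  rw [h2, h3, h4]
  simp

theorem pv_counts_eq_map (pl cb : List Char) :
    pvCountsB (pvPositions pl) pl cb
      = (PySem.List.pyRange 0 ((pl.length : Int) - (cb.length : Int) + 1) 1).map
          (fun s => pvHitsA pl cb s) := by
  have hlen : (pvCountsB (pvPositions pl) pl cb).length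
      = ((pl.length : Int) - (cb.length : Int) + 1).toNat := by
    rw [pv_countsB_flat, pv_bump_foldl_length, List.length_replicate]
  apply List.ext_getElem
  · rw [hlen, List.length_map, PySem.List.length_pyRange_one]
    simp
  · intro k h1 h2
    have hkn : (k : Int) < ((pl.length : Int) - (cb.length : Int) + 1) := by
      rw [hlen] at h1
      omega
    have hget : (pvCountsB (pvPositions pl) pl cb)[k]
        = PySem.List.pyGetD (pvCountsB (pvPositions pl) pl cb) (k : Int) 0 := by
      rw [PySem.List.pyGetD_natCast, List.getD_eq_getElem _ _ h1]
    rw [hget, pv_countsB_flat,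
      pv_bump_foldl_getD _ _ _ (by omega) (by rw [List.length_replicate]; omega),
      pv_count_events pl cb (k : Int) (by omega)]
    have hrep : PySem.List.pyGetD
        (List.replicate ((pl.length : Int) - (cb.length : Int) + 1).toNat (0 : Int)) (k : Int) 0 = 0 := by
      rw [PySem.List.pyGetD_natCast]
      simp [List.getD_eq_getElem?_getD, List.getElem?_replicate]
      split_ifs <;> simp
    rw [hrep, List.getElem_map, PySem.List.getElem_pyRange_one]
    simp

theorem pv_max_foldl (l : List Int) (f : Int → Int) (hf : ∀ x ∈ l, 0 ≤ f x) :
    (PySem.List.max? (l.map f) (fun x => x)).getD 0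
      = l.foldl (fun b x => if f x > b then f x else b) 0 := by
  cases l with
  | nil => simp [PySem.List.max?]
  | cons x t =>
    rw [List.map_cons, PySem.List.max?_id_cons, Option.getD_some, List.foldl_cons]
    have h0 : (if f x > 0 then f x else 0) = f x := by
      have := hf x List.mem_cons_self
      split_ifs <;> omega
    rw [h0, List.foldl_map]
    have hfun : (fun (b : Int) y => max b (f y)) = (fun b y => if f y > b then f y else b) := by
      funext b y
      rw [max_def]
      split_ifs <;> omega
    rw [hfun]

theorem pv_best_eq (pl cb : List Char) :
    pvBestA pl cb = (PySem.List.max? (pvCountsB (pvPositions pl) pl cb) (fun x => x)).getD 0 := by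
  rw [pv_counts_eq_map, pv_max_foldl _ _ (fun x _ => pv_hits_nonneg pl cb x)]
  rfl

-- ===== VERDICT (by name: the statement is the Claim_ definition above) =====
theorem score_crib_partial_free_spec : Claim_equal_score_crib_partial_free := by
  intro plaintext _
  unfold Spec_score_crib_partial_free score_crib_partial_free score_crib_partial_free_alt
  simp only [List.foldl_cons, List.foldl_nil, pv_best_eq, zero_add]
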